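-- pv_equiv track=rewrite | github.com/ayoubzulfiqar/Leetcode-Medium | MinimumAdditionstoMakeValidString/minimum_additions_to_make_valid_string.py | minimumAdditions
-- ===== SOURCE A (Python) =====
-- def minimumAdditions(word: str) -> int:
--     additions = 0
--     current_expected_idx = 0
--     char_to_idx = {'a': 0, 'b': 1, 'c': 2}
--
--     for char in word:
--         char_idx = char_to_idx[char]
--
--         if char_idx == current_expected_idx:
--             current_expected_idx = (current_expected_idx + 1) % 3
--         elif char_idx > current_expected_idx:
--             additions += (char_idx - current_expected_idx)
--             current_expected_idx = (char_idx + 1) % 3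
--         else:
--             additions += (3 - current_expected_idx)
--             additions += char_idx
--             current_expected_idx = (char_idx + 1) % 3
--
--     additions += (3 - current_expected_idx) % 3
--
--     return additions
-- ===== SOURCE B (Python) =====
-- def minimumAdditions(word: str) -> int:
--     char_to_idx = {'a': 0, 'b': 1, 'c': 2}
--     idx = [char_to_idx[c] for c in word]
--     if not idx:
--         return 0
--     blocks = 1 + sum(1 for p, q in zip(idx, idx[1:]) if q <= p)
--     return 3 * blocks - len(idx)
-- ===== Notes on version B (the rewrite author's own statement) =====
-- stated objective: simpler
-- what changed: Replaces the per-character expected-index state machine with a closed-form run count: blocks = 1 + number of adjacent non-increasing index pairs, answer = 3*blocks - len(word).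
import Mathlib
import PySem

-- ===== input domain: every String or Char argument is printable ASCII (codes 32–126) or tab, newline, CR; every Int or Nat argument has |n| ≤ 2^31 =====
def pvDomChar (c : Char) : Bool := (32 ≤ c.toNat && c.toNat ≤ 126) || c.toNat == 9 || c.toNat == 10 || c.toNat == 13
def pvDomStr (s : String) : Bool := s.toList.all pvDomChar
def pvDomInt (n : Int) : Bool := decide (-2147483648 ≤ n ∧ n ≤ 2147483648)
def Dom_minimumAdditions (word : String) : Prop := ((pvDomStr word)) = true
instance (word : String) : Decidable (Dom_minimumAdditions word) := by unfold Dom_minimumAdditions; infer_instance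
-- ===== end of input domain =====

-- B replaces A's per-character expected-index state machine by a closed-form count of
-- strictly-increasing runs (simpler); equal wherever A returns (Pre_: only 'a'/'b'/'c' chars).


-- ===== PORT A =====
-- char_to_idx[char]: dict lookup; a missing key is a KeyError, excluded by Pre_ (default 0 is never read there)
def pvIdx (c : Char) : Int :=
  if c = 'a' then 0 else if c = 'b' then 1 else if c = 'c' then 2 else 0

-- loop body of A: state = (additions, current_expected_idx)
def pvAStep (s : Int × Int) (c : Char) : Int × Int :=
  let charIdx := pvIdx c
  if charIdx = s.2 then (s.1, (s.2 + 1) % 3)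
  else if charIdx > s.2 then (s.1 + (charIdx - s.2), (charIdx + 1) % 3)
  else (s.1 + (3 - s.2) + charIdx, (charIdx + 1) % 3)

def minimumAdditions (word : String) : Int :=
  let s := word.toList.foldl pvAStep (0, 0)
  s.1 + (3 - s.2) % 3

-- ===== PORT B =====
def minimumAdditions_alt (word : String) : Int :=
  let idx := word.toList.map pvIdx
  match idx with
  | [] => 0
  | _ :: t => 3 * (1 + ((idx.zip t).countP (fun pq => pq.2 ≤ pq.1) : Int)) - idx.length

-- ===== PRECONDITION & SPEC =====
-- Pre_: A (and B) raise KeyError on any character other than 'a','b','c'; exactly those inputs are excluded.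
def Pre_minimumAdditions (word : String) : Prop :=
  (word.toList.all fun c => c == 'a' || c == 'b' || c == 'c') = true
instance (word : String) : Decidable (Pre_minimumAdditions word) := by
  unfold Pre_minimumAdditions; infer_instance

def pvWitness_minimumAdditions : String := "acbc"

def Spec_minimumAdditions (word : String) (out : Int) : Prop := out = minimumAdditions_alt word
instance (word : String) (out : Int) : Decidable (Spec_minimumAdditions word out) := by unfold Spec_minimumAdditions; infer_instance

-- ===== CLAIM (what is proved, stated in full; the proofs are below) =====
def Claim_equal_minimumAdditions : Prop := ∀ (word : String), Dom_minimumAdditions word → Pre_minimumAdditions word → Spec_minimumAdditions word (minimumAdditions word)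

-- ===== LEMMAS AND PROOFS =====

-- number of non-increases in p :: (map pvIdx t), recursively
def pvCnt (p : Int) : List Char → Int
  | [] => 0
  | c :: t => (if pvIdx c ≤ p then 1 else 0) + pvCnt (pvIdx c) t

lemma pvCnt_eq_countP (t : List Char) (h : Char) :
    (((((h :: t).map pvIdx).zip (t.map pvIdx)).countP (fun pq => pq.2 ≤ pq.1) : Int))
      = pvCnt (pvIdx h) t := by
  induction t generalizing h with
  | nil => simp [pvCnt]
  | cons c t ih =>
    simp only [List.map_cons, List.zip_cons_cons, List.countP_cons, pvCnt]
    rw [← ih c]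
    by_cases hle : pvIdx c ≤ pvIdx h <;> simp [hle] <;> try ring

lemma pvIdx_mem (c : Char) : pvIdx c = 0 ∨ pvIdx c = 1 ∨ pvIdx c = 2 := by
  unfold pvIdx; split_ifs <;> simp

-- loop invariant: starting from expected index (p+1)%3 with accumulator acc,
-- final additions + trailing (3 - e) % 3 equals acc + (2 - p) + 3 * pvCnt p t - |t|
lemma pvFold_invariant (t : List Char) (p acc : Int)
    (hp : p = 0 ∨ p = 1 ∨ p = 2) :
    (t.foldl pvAStep (acc, (p + 1) % 3)).1 + (3 - (t.foldl pvAStep (acc, (p + 1) % 3)).2) % 3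
      = acc + (2 - p) + 3 * pvCnt p t - t.length := by
  induction t generalizing p acc with
  | nil =>
    simp only [List.foldl_nil, pvCnt, List.length_nil]
    rcases hp with h | h | h <;> subst h <;> simp
  | cons c t ih =>
    have hc := pvIdx_mem c
    simp only [List.foldl_cons, pvCnt, List.length_cons]
    have hstep : pvAStep (acc, (p + 1) % 3) c
        = ((acc + (pvIdx c - p - 1) + (if pvIdx c ≤ p then 3 else 0)), (pvIdx c + 1) % 3) := by
      rcases hp with h | h | h <;> rcases hc with h' | h' | h' <;>
        simp [pvAStep, h, h'] <;> omega
    rw [hstep, ih (pvIdx c) _ hc]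
    push_cast
    split_ifs <;> ring

lemma pvFirst_step (c : Char) :
    pvAStep (0, 0) c = (pvIdx c, (pvIdx c + 1) % 3) := by
  rcases pvIdx_mem c with h | h | h <;> simp [pvAStep, h]

-- ===== VERDICT (by name: the statement is the Claim_ definition above) =====
theorem minimumAdditions_spec : Claim_equal_minimumAdditions := by
  intro word _hdom _hpre
  unfold Spec_minimumAdditions minimumAdditions minimumAdditions_alt
  cases hw : word.toList with
  | nil => simp
  | cons h t =>
    simp only [List.foldl_cons, pvFirst_step, List.map_cons, List.length_cons]
    rw [pvFold_invariant t (pvIdx h) (pvIdx h) (pvIdx_mem h),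
      ← pvCnt_eq_countP t h]
    push_cast
    simp only [List.map_cons, List.length_map]
    ring
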